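-- pv_equiv track=rewrite | github.com/Loukasx2/intro_to_ai_group_57 | minmax2.py | choose_best_move
-- ===== SOURCE A (Python) =====
-- def evaluate_move(move, goals):
--     """
--     Evaluate a move based on the distance to the goals.
--     """
--     score = 0
--     for goal in goals:
--         distance = abs(move[0] - goal[0]) + abs(move[1] - goal[1])
--         score += distance
--     return score
--
-- def choose_best_move(available_moves, goals, current_position):
--     """
--     Choose the move with the highest score based on the evaluation function.
--     """
--     best_move = None
--     best_score = float('inf')  # Initialize best_score to positive infinity
--     for move in available_moves:
--         # Check if move puts the pawn on a goal
--         if move in goals: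
--             # If pawn is already on a goal, skip move unless necessary
--             if current_position not in goals:
--                 score = evaluate_move(move, goals)
--             else:
--                 # If pawn is already on a goal and it's necessary to move, prioritize this move
--                 score = 0
--         else:
--             score = evaluate_move(move, goals)
--         if score < best_score:
--             best_move = move
--             best_score = score
--     return best_move
-- ===== SOURCE B (Python) =====
-- def choose_best_move(available_moves, goals, current_position):
--     """
--     Choose the first move with minimal total Manhattan distance to the goals
--     (score 0 for a move onto a goal when the current position is on a goal),
--     using per-axis sorted goal coordinates, prefix sums and binary search.
--     """
--     if not available_moves:
--         return None
--     if not goals: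
--         # every move scores 0, so the first move wins
--         return available_moves[0]
--     xs = sorted(g[0] for g in goals)
--     ys = sorted(g[1] for g in goals)
--
--     def prefix(arr):
--         pre = [0]
--         s = 0
--         for a in arr:
--             s += a
--             pre.append(s)
--         return pre
--
--     px = prefix(xs)
--     py = prefix(ys)
--     n = len(goals)
--
--     def bisect_left(arr, v):
--         # stdlib bisect.bisect_left, hand-written (no imports available)
--         lo, hi = 0, len(arr)
--         while lo < hi:
--             mid = (lo + hi) // 2
--             if arr[mid] < v:
--                 lo = mid + 1
--             else:
--                 hi = mid
--         return lo
--
--     def dist_sum(v, arr, pre):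
--         # sum(|v - a| for a in arr) via the sorted order and prefix sums
--         k = bisect_left(arr, v)
--         return v * k - pre[k] + (pre[n] - pre[k]) - v * (n - k)
--
--     goal_set = {tuple(g) for g in goals}
--     on_goal = tuple(current_position) in goal_set
--     best = None
--     best_score = None
--     for move in available_moves:
--         if on_goal and tuple(move) in goal_set:
--             score = 0
--         else:
--             score = dist_sum(move[0], xs, px) + dist_sum(move[1], ys, py)
--         if best_score is None or score < best_score:
--             best = move
--             best_score = score
--     return best
-- ===== Notes on version B (the rewrite author's own statement) =====
-- stated objective: faster
-- what changed: B replaces A's per-move linear scan over all goals by per-axis sorted goal coordinates with prefix sums and binary search (plus a set for the goal-membership tests), computing each move's total Manhattan distance in O(log G).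
-- outside the precondition, e.g. on choose_best_move([(1,)], [(1,)], (1,)): A returns (1,), B raises IndexError
import Mathlib
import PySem

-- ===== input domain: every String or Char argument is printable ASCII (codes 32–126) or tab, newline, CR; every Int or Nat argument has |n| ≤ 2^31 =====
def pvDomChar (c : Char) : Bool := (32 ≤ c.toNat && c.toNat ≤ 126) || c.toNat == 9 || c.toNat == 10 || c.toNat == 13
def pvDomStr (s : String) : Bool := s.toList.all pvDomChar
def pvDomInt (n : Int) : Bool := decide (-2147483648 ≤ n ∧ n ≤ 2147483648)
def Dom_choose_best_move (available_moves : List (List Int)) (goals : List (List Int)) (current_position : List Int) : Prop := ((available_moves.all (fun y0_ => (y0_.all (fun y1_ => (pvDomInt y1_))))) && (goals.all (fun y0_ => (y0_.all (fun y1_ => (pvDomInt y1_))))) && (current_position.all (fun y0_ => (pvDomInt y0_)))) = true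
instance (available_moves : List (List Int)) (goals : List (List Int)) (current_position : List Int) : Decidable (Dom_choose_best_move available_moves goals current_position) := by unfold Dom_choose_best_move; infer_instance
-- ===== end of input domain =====

-- B replaces A's per-move scan over all goals by per-axis sorted goal coordinates,
-- prefix sums and binary search (O((M+G) log G) instead of O(M*G)); return values
-- agree on Pre_ (inputs where Python A does not raise IndexError and B's upfront
-- coordinate extraction is defined).

-- ===== PORT A =====
-- indexing move[0], move[1], goal[0], goal[1] is ported with pyGet? + getD 0:
-- exact under Pre_choose_best_move, where every index is in range
def evaluate_move (move : List Int) (goals : List (List Int)) : Int :=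
  goals.foldl (fun score goal =>
    score + (|(PySem.List.pyGet? move 0).getD 0 - (PySem.List.pyGet? goal 0).getD 0|
           + |(PySem.List.pyGet? move 1).getD 0 - (PySem.List.pyGet? goal 1).getD 0|)) 0

-- best_score starts at float('inf'); an int score is always < inf, so the state is
-- (best_move, best_score) with best_score = none meaning inf
def choose_best_move (available_moves : List (List Int)) (goals : List (List Int)) (current_position : List Int) : Option (List Int) :=
  (available_moves.foldl (fun (st : Option (List Int) × Option Int) move =>
      let score : Int :=
        if goals.contains move then
          if !(goals.contains current_position) then evaluate_move move goals
          else 0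
        else evaluate_move move goals
      match st.2 with
      | none => (some move, some score)
      | some bs => if score < bs then (some move, some score) else st)
    (none, none)).1

-- ===== PORT B =====
-- pre = [0]; s = 0; for a in arr: s += a; pre.append(s)
def pvPrefix (arr : List Int) : List Int :=
  (arr.foldl (fun (st : Int × List Int) a => (st.1 + a, st.2 ++ [st.1 + a])) (0, [0])).2

-- Source B's hand-written bisect_left is stdlib bisect.bisect_left = PySem.List.bisectLeft
def pvDistSum (v : Int) (arr pre : List Int) (n : Nat) : Int :=
  let k := PySem.List.bisectLeft arr v
  v * (k : Int) - pre.getD k 0 + (pre.getD n 0 - pre.getD k 0) - v * ((n : Int) - (k : Int))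

def choose_best_move_alt (available_moves : List (List Int)) (goals : List (List Int)) (current_position : List Int) : Option (List Int) :=
  if available_moves.isEmpty then none
  else if goals.isEmpty then PySem.List.pyGet? available_moves 0
  else
    let xs := PySem.List.sorted (goals.map (fun g => (PySem.List.pyGet? g 0).getD 0)) (fun x => x)
    let ys := PySem.List.sorted (goals.map (fun g => (PySem.List.pyGet? g 1).getD 0)) (fun x => x)
    let px := pvPrefix xs
    let py := pvPrefix ys
    let n := goals.length
    let goal_set := PySem.Set.ofList goals
    let on_goal := PySem.Set.contains goal_set current_position
    (available_moves.foldl (fun (st : Option (List Int) × Option Int) move =>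
        let score : Int :=
          if on_goal && PySem.Set.contains goal_set move then 0
          else pvDistSum ((PySem.List.pyGet? move 0).getD 0) xs px n
             + pvDistSum ((PySem.List.pyGet? move 1).getD 0) ys py n
        match st.2 with
        | none => (some move, some score)
        | some bs => if score < bs then (some move, some score) else st)
      (none, none)).1

-- ===== PRECONDITION & SPEC =====
-- Pre_ excludes the inputs where Python raises IndexError on a row shorter than 2:
-- A raises there whenever it evaluates a distance; the only excluded inputs on which
-- A still returns are degenerate ones where every move is skipped (every move and the
-- current position lie in goals) so no distance is ever computed, while B's upfront
-- coordinate extraction raises.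
def Pre_choose_best_move (available_moves : List (List Int)) (goals : List (List Int)) (current_position : List Int) : Prop :=
  available_moves = [] ∨ goals = [] ∨ ((∀ m ∈ available_moves, 2 ≤ m.length) ∧ (∀ g ∈ goals, 2 ≤ g.length))
instance (available_moves : List (List Int)) (goals : List (List Int)) (current_position : List Int) : Decidable (Pre_choose_best_move available_moves goals current_position) := by unfold Pre_choose_best_move; infer_instance

def pvWitness_choose_best_move : List (List Int) × List (List Int) × List Int :=
  ([[0, 0], [1, 1]], [[1, 1], [2, 2]], [0, 0])

def Spec_choose_best_move (available_moves : List (List Int)) (goals : List (List Int)) (current_position : List Int) (out : Option (List Int)) : Prop := out = choose_best_move_alt available_moves goals current_position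
instance (available_moves : List (List Int)) (goals : List (List Int)) (current_position : List Int) (out : Option (List Int)) : Decidable (Spec_choose_best_move available_moves goals current_position out) := by unfold Spec_choose_best_move; infer_instance

-- ===== CLAIM (what is proved, stated in full; the proofs are below) =====
def Claim_equal_choose_best_move : Prop := ∀ (available_moves : List (List Int)) (goals : List (List Int)) (current_position : List Int), Dom_choose_best_move available_moves goals current_position → Pre_choose_best_move available_moves goals current_position → Spec_choose_best_move available_moves goals current_position (choose_best_move available_moves goals current_position)

-- ===== LEMMAS AND PROOFS =====

lemma pvMapSubL (v : Int) : ∀ (l : List Int), (l.map (fun a => v - a)).sum = v * l.length - l.sum := by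
  intro l; induction l with
  | nil => simp
  | cons a t ih => simp [ih]; ring

lemma pvMapSubR (v : Int) : ∀ (l : List Int), (l.map (fun a => a - v)).sum = l.sum - v * l.length := by
  intro l; induction l with
  | nil => simp
  | cons a t ih => simp [ih]; ring

lemma pvPrefix_aux (arr : List Int) : ∀ (s : Int) (acc : List Int),
    (arr.foldl (fun (st : Int × List Int) a => (st.1 + a, st.2 ++ [st.1 + a])) (s, acc)).2
    = acc ++ (List.range arr.length).map (fun k => s + (arr.take (k + 1)).sum) := by
  induction arr with
  | nil => intro s acc; simp
  | cons a t ih =>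
      intro s acc
      simp only [List.foldl_cons, ih, List.length_cons, List.range_succ_eq_map, List.map_cons,
        List.map_map, List.take_succ_cons, List.sum_cons]
      simp [Function.comp_def, List.append_assoc]
      intro k _
      ring

lemma pvPrefix_spec (arr : List Int) :
    pvPrefix arr = (List.range (arr.length + 1)).map (fun k => (arr.take k).sum) := by
  unfold pvPrefix
  rw [pvPrefix_aux]
  rw [List.range_succ_eq_map, List.map_cons, List.map_map]
  simp [Function.comp_def]

lemma pvPrefix_getD (arr : List Int) (k : Nat) (hk : k ≤ arr.length) :
    (pvPrefix arr).getD k 0 = (arr.take k).sum := by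
  rw [pvPrefix_spec]
  have hk' : k < ((List.range (arr.length + 1)).map (fun k => (arr.take k).sum)).length := by
    simp; omega
  rw [List.getD_eq_getElem _ _ hk', List.getElem_map, List.getElem_range]

-- sum of |v - a| over any list of coordinates, computed B's way from the sorted order
lemma pvDistSum_eq (v : Int) (cs : List Int) :
    pvDistSum v (PySem.List.sorted cs (fun x => x)) (pvPrefix (PySem.List.sorted cs (fun x => x))) cs.length
    = (cs.map (fun a => |v - a|)).sum := by
  set arr := PySem.List.sorted cs (fun x => x) with harr
  have hperm : arr.Perm cs := PySem.List.sorted_perm cs (fun x => x) false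
  have hlen : arr.length = cs.length := hperm.length_eq
  have hpair : arr.Pairwise (fun a b => a ≤ b) := PySem.List.sorted_pairwise cs (fun x => x)
  obtain ⟨hk, hlt, hge⟩ := PySem.List.bisectLeft_spec arr v hpair
  set k := PySem.List.bisectLeft arr v with hkdef
  have hsum : (cs.map (fun a => |v - a|)).sum = (arr.map (fun a => |v - a|)).sum :=
    ((hperm.map (fun a => |v - a|)).sum_eq).symm
  have hsplit : arr = arr.take k ++ arr.drop k := (List.take_append_drop k arr).symm
  have htakelen : (arr.take k).length = k := by simp [hk]
  have hdroplen : (arr.drop k).length = arr.length - k := by simp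
  have htake : (arr.take k).map (fun a => |v - a|) = (arr.take k).map (fun a => v - a) := by
    apply List.map_congr_left
    intro a ha
    obtain ⟨i, hi, hia⟩ := List.mem_iff_getElem.mp ha
    have hia' : arr[i]'(by omega) = a := by rw [← hia]; exact (List.getElem_take).symm
    have : a < v := by rw [← hia']; exact hlt i (by omega) (by omega)
    rw [abs_of_pos (by omega)]
  have hdrop : (arr.drop k).map (fun a => |v - a|) = (arr.drop k).map (fun a => a - v) := by
    apply List.map_congr_left
    intro a ha
    obtain ⟨i, hi, hia⟩ := List.mem_iff_getElem.mp ha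
    have hia' : arr[k + i]'(by simp at hi; omega) = a := by rw [← hia]; exact (List.getElem_drop).symm
    have : v ≤ a := by rw [← hia']; exact hge (k + i) (by simp at hi; omega) (by omega)
    rw [abs_of_nonpos (by omega)]; ring
  have hsum2 : (arr.map (fun a => |v - a|)).sum
      = (v * k - (arr.take k).sum) + ((arr.drop k).sum - v * ((arr.length : Int) - k)) := by
    conv_lhs => rw [hsplit]
    rw [List.map_append, List.sum_append, htake, hdrop, pvMapSubL, pvMapSubR, htakelen, hdroplen]
    have : ((arr.length - k : Nat) : Int) = (arr.length : Int) - k := by omega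
    rw [this]
  have hdropsum : (arr.drop k).sum = arr.sum - (arr.take k).sum := by
    conv_lhs => rw [show arr.drop k = arr.drop k from rfl]
    have := congrArg List.sum hsplit
    rw [List.sum_append] at this
    omega
  simp only [pvDistSum]
  rw [← hkdef, pvPrefix_getD arr k hk, pvPrefix_getD arr cs.length (by omega),
    hsum, hsum2, hdropsum]
  have : arr.take cs.length = arr := List.take_of_length_le (by omega)
  rw [this, hlen]
  ring

lemma pvSetContains (xs : List (List Int)) (y : List Int) :
    PySem.Set.contains (PySem.Set.ofList xs) y = xs.contains y := by
  simp only [PySem.Set.contains]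
  rw [Bool.eq_iff_iff]
  simp only [List.contains_iff_mem]
  exact PySem.Set.mem_ofList xs y

-- A's per-move score equals B's per-move score, for every move and every goal list
lemma pvScore_eq (goals : List (List Int)) (current_position move : List Int) :
    (if goals.contains move then
       if !(goals.contains current_position) then evaluate_move move goals else 0
     else evaluate_move move goals)
    = (if PySem.Set.contains (PySem.Set.ofList goals) current_position
          && PySem.Set.contains (PySem.Set.ofList goals) move then (0 : Int)
       else pvDistSum ((PySem.List.pyGet? move 0).getD 0)
              (PySem.List.sorted (goals.map (fun g => (PySem.List.pyGet? g 0).getD 0)) (fun x => x))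
              (pvPrefix (PySem.List.sorted (goals.map (fun g => (PySem.List.pyGet? g 0).getD 0)) (fun x => x)))
              goals.length
          + pvDistSum ((PySem.List.pyGet? move 1).getD 0)
              (PySem.List.sorted (goals.map (fun g => (PySem.List.pyGet? g 1).getD 0)) (fun x => x))
              (pvPrefix (PySem.List.sorted (goals.map (fun g => (PySem.List.pyGet? g 1).getD 0)) (fun x => x)))
              goals.length) := by
  have heval : evaluate_move move goals
      = pvDistSum ((PySem.List.pyGet? move 0).getD 0)
          (PySem.List.sorted (goals.map (fun g => (PySem.List.pyGet? g 0).getD 0)) (fun x => x))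
          (pvPrefix (PySem.List.sorted (goals.map (fun g => (PySem.List.pyGet? g 0).getD 0)) (fun x => x)))
          goals.length
        + pvDistSum ((PySem.List.pyGet? move 1).getD 0)
          (PySem.List.sorted (goals.map (fun g => (PySem.List.pyGet? g 1).getD 0)) (fun x => x))
          (pvPrefix (PySem.List.sorted (goals.map (fun g => (PySem.List.pyGet? g 1).getD 0)) (fun x => x)))
          goals.length := by
    unfold evaluate_move
    rw [PySem.List.foldl_add, zero_add, PySem.List.sum_map_add_int]
    have h0 := pvDistSum_eq ((PySem.List.pyGet? move 0).getD 0) (goals.map (fun g => (PySem.List.pyGet? g 0).getD 0))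
    have h1 := pvDistSum_eq ((PySem.List.pyGet? move 1).getD 0) (goals.map (fun g => (PySem.List.pyGet? g 1).getD 0))
    rw [List.length_map, List.map_map] at h0 h1
    simp only [Function.comp_def] at h0 h1
    rw [h0, h1]
  rw [pvSetContains, pvSetContains, heval]
  by_cases hm : move ∈ goals <;> by_cases hc : current_position ∈ goals <;>
    simp [hm, hc]

-- with goals = [], once the first move is taken the state never changes (every score is 0)
lemma pvFoldEmptyGoals (cur m : List Int) : ∀ (t : List (List Int)),
    (t.foldl (fun (st : Option (List Int) × Option Int) move =>
        let score : Int :=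
          if ([] : List (List Int)).contains move then
            if !(([] : List (List Int)).contains cur) then evaluate_move move []
            else 0
          else evaluate_move move []
        match st.2 with
        | none => (some move, some score)
        | some bs => if score < bs then (some move, some score) else st)
      (some m, some 0)) = (some m, some 0) := by
  intro t
  induction t with
  | nil => rfl
  | cons a t ih =>
      rw [List.foldl_cons]
      have hz : evaluate_move a [] = 0 := rfl
      simp only [List.contains_nil, hz]
      simpa using ih

-- ===== VERDICT (by name: the statement is the Claim_ definition above) =====
theorem choose_best_move_spec : Claim_equal_choose_best_move := by
  intro available_moves goals current_position _ hpre
  unfold Spec_choose_best_move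
  unfold choose_best_move choose_best_move_alt
  cases available_moves with
  | nil => simp
  | cons m t =>
      cases goals with
      | nil =>
          simp only [List.isEmpty_cons, List.isEmpty_nil, if_true, Bool.false_eq_true, if_false]
          rw [List.foldl_cons]
          have hz : ∀ mv : List Int, evaluate_move mv [] = 0 := fun _ => rfl
          have := pvFoldEmptyGoals current_position m t
          simp only [List.contains_nil, Bool.false_eq_true, if_false, hz] at this ⊢
          rw [this]
          simp [PySem.List.pyGet?, PySem.List.pyIdx?]
      | cons g gs =>
          simp only [List.isEmpty_cons, Bool.false_eq_true, if_false]
          apply congrArg Prod.fst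
          apply PySem.List.foldl_congr_mem
          intro acc move _
          simp only [pvScore_eq (g :: gs) current_position move]
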